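-- pv_equiv track=rewrite | github.com/projeto-de-algoritmos-2026/G25_Grafos_PA-26.1 | metro_bfs.py | buscar_estacao
-- ===== SOURCE A (Python) =====
-- def buscar_estacao(termo, nome_para_ids, info):
--     termo = termo.lower()
--     resultados = []
--     vistos = set()
--     for chave, ids in nome_para_ids.items():
--         if termo in chave:
--             for id_est in ids:
--                 if id_est not in vistos:
--                     vistos.add(id_est)
--                     nome_pt, nome_orig, nome_trans, linha = info.get(
--                         id_est, (id_est, id_est, id_est, "?")
--                     )
--                     resultados.append((id_est, nome_pt, linha))
--     return resultados
-- ===== SOURCE B (Python) =====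
-- def buscar_estacao(termo, nome_para_ids, info):
--     t = termo.lower()
--     # flatten all ids of matching names (duplicates still present)
--     todos = [i for chave, ids in nome_para_ids.items() if t in chave for i in ids]
--
--     # dedup by recursive elimination: keep the head, delete ALL its later
--     # copies from the tail, recurse (the classic filter-nub; no seen-set).
--     def first_only(xs):
--         if not xs:
--             return []
--         h = xs[0]
--         return [h] + first_only([x for x in xs[1:] if x != h])
--
--     def linha(i):
--         nome_pt, _, _, lin = info.get(i, (i, i, i, "?"))
--         return (i, nome_pt, lin)
--
--     return [linha(i) for i in first_only(todos)]
-- ===== Notes on version B (the rewrite author's own statement) =====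
-- stated objective: alternative
-- what changed: Replaces A's single interleaved loop with a mutable seen-set by staged passes whose dedup uses a different algorithm: flatten ids of matching names, then recursive filter-nub deduplication (keep head, delete all later copies from the tail, recurse - no seen structure at all), then a projection map.
import Mathlib
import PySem

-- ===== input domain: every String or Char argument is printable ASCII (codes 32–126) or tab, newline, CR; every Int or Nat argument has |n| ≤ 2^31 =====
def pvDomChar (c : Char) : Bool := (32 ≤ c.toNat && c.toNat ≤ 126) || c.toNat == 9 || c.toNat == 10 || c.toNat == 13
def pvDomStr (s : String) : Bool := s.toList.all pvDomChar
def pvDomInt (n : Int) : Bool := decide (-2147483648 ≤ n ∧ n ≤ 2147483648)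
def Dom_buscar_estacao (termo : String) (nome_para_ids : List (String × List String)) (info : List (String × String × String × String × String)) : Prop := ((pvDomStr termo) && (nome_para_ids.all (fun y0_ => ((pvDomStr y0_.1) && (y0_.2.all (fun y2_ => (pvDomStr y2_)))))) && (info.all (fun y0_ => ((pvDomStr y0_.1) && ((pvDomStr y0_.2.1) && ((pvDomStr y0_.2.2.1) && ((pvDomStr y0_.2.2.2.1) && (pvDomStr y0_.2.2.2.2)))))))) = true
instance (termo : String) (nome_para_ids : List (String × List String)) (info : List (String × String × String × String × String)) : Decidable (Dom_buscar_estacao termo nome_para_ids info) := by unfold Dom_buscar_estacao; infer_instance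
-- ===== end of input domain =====

-- B replaces A's interleaved seen-set loop by staged passes whose dedup is a different
-- algorithm: recursive filter-nub (keep head, delete its later copies, recurse), no seen structure.

-- ===== PORT A =====
-- projection of one id via info.get(id, (id,id,id,"?")) (shared tuple-build shape of both Pythons)
def pvProj (info : List (String × String × String × String × String)) (id : String) : String × String × String :=
  let v := (PySem.Dict.mk info).getD id (id, id, id, "?")
  (id, v.1, v.2.2.2)

-- body of A's inner 'for id_est in ids' loop
def pvStepA (info : List (String × String × String × String × String))
    (st : List (String × String × String) × PySem.Set String) (id : String) :
    List (String × String × String) × PySem.Set String :=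
  if PySem.Set.contains st.2 id then st
  else (st.1 ++ [pvProj info id], PySem.Set.add st.2 id)

def buscar_estacao (termo : String) (nome_para_ids : List (String × List String)) (info : List (String × String × String × String × String)) : List (String × String × String) :=
  let t := PySem.Str.lower termo
  (nome_para_ids.foldl
    (fun st p => if PySem.Str.isIn t p.1 then p.2.foldl (pvStepA info) st else st)
    ([], PySem.Set.empty)).1

-- ===== PORT B =====
-- Source B's first_only: keep head, filter all its later copies out of the tail, recurse
def pvFirstOnly : List String → List String
  | [] => []
  | h :: rest => [h] ++ pvFirstOnly (rest.filter (fun x => x ≠ h))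
termination_by L => L.length
decreasing_by
  simpa using Nat.lt_succ_of_le (le_trans (List.length_filter_le _ _) (by simp))

def buscar_estacao_alt (termo : String) (nome_para_ids : List (String × List String)) (info : List (String × String × String × String × String)) : List (String × String × String) :=
  let t := PySem.Str.lower termo
  let todos := (nome_para_ids.filter (fun p => PySem.Str.isIn t p.1)).flatMap (fun p => p.2)
  (pvFirstOnly todos).map (pvProj info)

-- ===== PRECONDITION & SPEC =====
def Spec_buscar_estacao (termo : String) (nome_para_ids : List (String × List String)) (info : List (String × String × String × String × String)) (out : List (String × String × String)) : Prop := out = buscar_estacao_alt termo nome_para_ids info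
instance (termo : String) (nome_para_ids : List (String × List String)) (info : List (String × String × String × String × String)) (out : List (String × String × String)) : Decidable (Spec_buscar_estacao termo nome_para_ids info out) := by unfold Spec_buscar_estacao; infer_instance

-- ===== CLAIM =====
def Claim_equal_buscar_estacao : Prop := ∀ (termo : String) (nome_para_ids : List (String × List String)) (info : List (String × String × String × String × String)), Dom_buscar_estacao termo nome_para_ids info → Spec_buscar_estacao termo nome_para_ids info (buscar_estacao termo nome_para_ids info)

-- ===== LEMMAS AND PROOFS =====

-- ids of L not already in s, first occurrences, in order (characterises A's seen-set loop)
def pvDedupFrom (s : PySem.Set String) : List String → List String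
  | [] => []
  | x :: xs => if PySem.Set.contains s x then pvDedupFrom s xs
               else x :: pvDedupFrom (PySem.Set.add s x) xs

theorem pv_inner_spec (info : List (String × String × String × String × String))
    (L : List String) : ∀ (res : List (String × String × String)) (s : PySem.Set String),
    L.foldl (pvStepA info) (res, s) =
      (res ++ (pvDedupFrom s L).map (pvProj info), L.foldl PySem.Set.add s) := by
  induction L with
  | nil => intro res s; simp [pvDedupFrom]
  | cons x xs ih =>
    intro res s
    by_cases h : x ∈ s
    · simp [List.foldl_cons, pvStepA, h, pvDedupFrom, ih, PySem.Set.add]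
    · simp [List.foldl_cons, pvStepA, h, pvDedupFrom, ih, PySem.Set.add]

theorem pv_outer_flatten (info : List (String × String × String × String × String))
    (t : String) (npi : List (String × List String)) :
    ∀ (st : List (String × String × String) × PySem.Set String),
    npi.foldl (fun st p => if PySem.Str.isIn t p.1 then p.2.foldl (pvStepA info) st else st) st =
      ((npi.filter (fun p => PySem.Str.isIn t p.1)).flatMap (fun p => p.2)).foldl (pvStepA info) st := by
  induction npi with
  | nil => intro st; simp
  | cons p rest ih =>
    intro st
    by_cases h : PySem.Chars.isIn t.toList p.1.toList = true
    · simp only [List.foldl_cons, List.filter_cons]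
      simp [h, List.foldl_append]
      simpa using ih (List.foldl (pvStepA info) st p.2)
    · simp only [List.foldl_cons, List.filter_cons]
      simp [h]
      simpa using ih st

-- A's seen-set dedup from state s computes filter-nub of the not-yet-seen elements
theorem pv_dedupFrom_eq_firstOnly (n : Nat) : ∀ (L : List String), L.length ≤ n →
    ∀ (s : PySem.Set String),
    pvDedupFrom s L = pvFirstOnly (L.filter (fun x => !(PySem.Set.contains s x))) := by
  induction n with
  | zero =>
    intro L hL s
    have : L = [] := List.eq_nil_of_length_eq_zero (Nat.le_zero.mp hL)
    subst this; simp [pvDedupFrom, pvFirstOnly]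
  | succ n ih =>
    intro L hL s
    match L with
    | [] => simp [pvDedupFrom, pvFirstOnly]
    | x :: xs =>
      have hxs : xs.length ≤ n := by simpa using hL
      by_cases h : x ∈ s
      · have : PySem.Set.contains s x = true := by simp [h]
        simp only [pvDedupFrom, this, if_pos, List.filter_cons, Bool.not_true]
        simp only [Bool.false_eq_true, if_false]
        exact ih xs hxs s
      · have hcx : PySem.Set.contains s x = false := by
          simp [h]
        simp only [pvDedupFrom, hcx, Bool.false_eq_true, if_false, List.filter_cons,
          Bool.not_false, if_pos, pvFirstOnly, List.filter_filter]
        refine congrArg (List.cons x) ?_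
        rw [ih xs hxs (PySem.Set.add s x)]
        refine congrArg pvFirstOnly (List.filter_congr ?_)
        intro y _
        have hadd : PySem.Set.add s x = s ++ [x] := PySem.Set.add_of_not_mem h
        by_cases hy : y ∈ s <;> by_cases he : y = x <;>
          simp [hadd, hy, he]

theorem pv_dedup_empty (L : List String) :
    pvDedupFrom PySem.Set.empty L = pvFirstOnly L := by
  have := pv_dedupFrom_eq_firstOnly L.length L (le_refl _) PySem.Set.empty
  simpa [PySem.Set.empty] using this

-- ===== VERDICT =====
theorem buscar_estacao_spec : Claim_equal_buscar_estacao := by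
  intro termo npi info _
  simp only [Spec_buscar_estacao, buscar_estacao, buscar_estacao_alt]
  rw [pv_outer_flatten, pv_inner_spec, pv_dedup_empty]
  simp
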